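-- pv_equiv track=rewrite | github.com/mautorresp/Teleport | tools/export_teleport_math_v8_4_pic1.py | leb_len
-- ===== SOURCE A (Python) =====
-- def leb_len(n):
--     """LEB128 7-bit group count for integer n (minimum 1)"""
--     if n == 0:
--         return 1
--     length = 0
--     while n > 0:
--         length += 1
--         n >>= 7
--     return length
-- ===== SOURCE B (Python) =====
-- def leb_len(n):
--     """LEB128 7-bit group count for integer n (minimum 1)"""
--     if n == 0:
--         return 1
--     return (n.bit_length() + 6) // 7
-- ===== Notes on version B (the rewrite author's own statement) =====
-- stated objective: simpler
-- what changed: Replaces the shift-count loop with a closed form on the bit length (ceiling division by the group width), keeping the separate zero case.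
-- outside the precondition, e.g. on leb_len(-5): A returns 0, B returns 1
import Mathlib
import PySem

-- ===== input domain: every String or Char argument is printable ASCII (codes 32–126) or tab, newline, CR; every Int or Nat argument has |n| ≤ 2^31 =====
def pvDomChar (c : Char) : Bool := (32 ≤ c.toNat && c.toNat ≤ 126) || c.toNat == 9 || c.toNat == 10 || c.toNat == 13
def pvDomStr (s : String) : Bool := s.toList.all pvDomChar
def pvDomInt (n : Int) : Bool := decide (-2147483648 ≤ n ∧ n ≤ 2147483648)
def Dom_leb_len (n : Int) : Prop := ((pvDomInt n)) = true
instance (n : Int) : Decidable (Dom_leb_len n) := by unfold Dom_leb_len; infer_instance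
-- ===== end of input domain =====

-- B replaces A's shift-count loop by the closed form (bit_length+6)//7 (simpler; same value on all n ≥ 0).

-- ===== PORT A =====
-- the 'while n > 0: length += 1; n >>= 7' loop, step for step
def lebLoop (n : Int) (length : Int) : Int :=
  if h : n > 0 then lebLoop (n >>> (7:Nat)) (length + 1) else length
termination_by n.toNat
decreasing_by
  simp only [Int.shiftRight_eq_div_pow]
  omega

def leb_len (n : Int) : Int :=
  if n = 0 then 1 else lebLoop n 0

-- ===== PORT B =====
def leb_len_alt (n : Int) : Int :=
  if n = 0 then 1
  else PySem.Int.floordiv ((PySem.Int.bitLength n : Int) + 6) 7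

-- ===== PRECONDITION & SPEC =====
-- Pre_ restricts to n ≥ 0, the natural domain of unsigned LEB128: on negative n no
-- group count is specified and the two defensible answers differ (A's loop body never
-- runs and it yields its initial accumulator; B's formula reads the bit length of |n|).
def Pre_leb_len (n : Int) : Prop := 0 ≤ n
instance (n : Int) : Decidable (Pre_leb_len n) := by unfold Pre_leb_len; infer_instance
def pvWitness_leb_len : Int := 300

def Spec_leb_len (n : Int) (out : Int) : Prop := out = leb_len_alt n
instance (n : Int) (out : Int) : Decidable (Spec_leb_len n out) := by unfold Spec_leb_len; infer_instance

-- ===== CLAIM (what is proved, stated in full; the proofs are below) =====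
def Claim_equal_leb_len : Prop := ∀ (n : Int), Dom_leb_len n → Pre_leb_len n → Spec_leb_len n (leb_len n)

-- ===== LEMMAS AND PROOFS =====

-- bitLength is the unique k with 2^(k-1) ≤ m.natAbs < 2^k (for m ≠ 0)
theorem bitLength_eq_of (m : Int) (k : Nat) (hm : m ≠ 0)
    (h1 : 2 ^ (k - 1) ≤ m.natAbs) (h2 : m.natAbs < 2 ^ k) :
    PySem.Int.bitLength m = k := by
  have hub := PySem.Int.lt_two_pow_bitLength m
  have hlb := PySem.Int.two_pow_bitLength_le m hm
  by_contra hne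
  rcases Nat.lt_or_ge (PySem.Int.bitLength m) k with h | h
  · have : (2:Nat) ^ (PySem.Int.bitLength m) ≤ 2 ^ (k - 1) :=
      Nat.pow_le_pow_right (by norm_num) (by omega)
    omega
  · have hk : k ≤ PySem.Int.bitLength m - 1 := by omega
    have : (2:Nat) ^ k ≤ 2 ^ (PySem.Int.bitLength m - 1) :=
      Nat.pow_le_pow_right (by norm_num) hk
    omega

-- the loop computes len + ceil(bitLength n / 7) for positive n
theorem lebLoop_eq (m : Nat) : ∀ (n : Int) (len : Int), 0 < n → n.toNat ≤ m →
    lebLoop n len = len + ((PySem.Int.bitLength n + 6) / 7 : Nat) := by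
  induction m using Nat.strong_induction_on with
  | _ m ih =>
    intro n len hn hnm
    rw [lebLoop.eq_def]
    simp only [hn, dite_true]
    have hsh : n >>> (7:Nat) = n / 128 := by
      rw [Int.shiftRight_eq_div_pow]; norm_num
    have hub := PySem.Int.lt_two_pow_bitLength n
    have hlb := PySem.Int.two_pow_bitLength_le n (by omega)
    have hna : n.natAbs = n.toNat := by omega
    have hL1 : 1 ≤ PySem.Int.bitLength n := by
      by_contra h
      rw [show PySem.Int.bitLength n = 0 by omega] at hub
      norm_num at hub
      omega
    by_cases h128 : n < 128
    · -- one more iteration, then the shifted value is 0 and the loop stops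
      have hz : n >>> (7:Nat) = 0 := by rw [hsh]; omega
      rw [hz, lebLoop.eq_def]
      simp only [show ¬ ((0:Int) > 0) by omega, dite_false]
      have hL7 : PySem.Int.bitLength n ≤ 7 := by
        by_contra hgt
        have h2 : (128:Nat) ≤ 2 ^ (PySem.Int.bitLength n - 1) := by
          calc (128:Nat) = 2 ^ 7 := by norm_num
            _ ≤ 2 ^ (PySem.Int.bitLength n - 1) :=
              Nat.pow_le_pow_right (by norm_num) (by omega)
        omega
      have he : (PySem.Int.bitLength n + 6) / 7 = 1 := by omega
      rw [he]; omega
    · -- n ≥ 128: recurse; bitLength drops by exactly 7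
      have hq : 0 < n / 128 := by omega
      have hrec := ih (n / 128).toNat (by omega) (n / 128) (len + 1) hq (le_refl _)
      rw [hsh, hrec]
      have hL8 : 8 ≤ PySem.Int.bitLength n := by
        by_contra hlt
        have h2 : (2:Nat) ^ PySem.Int.bitLength n ≤ 128 := by
          calc (2:Nat) ^ PySem.Int.bitLength n ≤ 2 ^ 7 :=
              Nat.pow_le_pow_right (by norm_num) (by omega)
            _ = 128 := by norm_num
        omega
      have hqa : (n / 128).natAbs = n.natAbs / 128 := by omega
      have hBL : PySem.Int.bitLength (n / 128) = PySem.Int.bitLength n - 7 := by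
        apply bitLength_eq_of _ _ (by omega)
        · rw [hqa]
          have h1 : (2:Nat) ^ (PySem.Int.bitLength n - 8) * 128 ≤ n.natAbs := by
            calc (2:Nat) ^ (PySem.Int.bitLength n - 8) * 128
                = 2 ^ (PySem.Int.bitLength n - 8) * 2 ^ 7 := by norm_num
              _ = 2 ^ (PySem.Int.bitLength n - 1) := by
                  rw [← pow_add]; congr 1; omega
              _ ≤ n.natAbs := hlb
          calc 2 ^ (PySem.Int.bitLength n - 7 - 1)
              = 2 ^ (PySem.Int.bitLength n - 8) := by congr 1
            _ ≤ n.natAbs / 128 := Nat.le_div_iff_mul_le (by norm_num) |>.2 h1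
        · rw [hqa]
          have h2 : n.natAbs < 2 ^ (PySem.Int.bitLength n - 7) * 128 := by
            calc n.natAbs < 2 ^ PySem.Int.bitLength n := hub
              _ = 2 ^ (PySem.Int.bitLength n - 7) * 2 ^ 7 := by
                  rw [← pow_add]; congr 1; omega
              _ = 2 ^ (PySem.Int.bitLength n - 7) * 128 := by norm_num
          exact Nat.div_lt_of_lt_mul (by omega)
      rw [hBL]
      have he : (PySem.Int.bitLength n - 7 + 6) / 7 + 1 = (PySem.Int.bitLength n + 6) / 7 := by
        omega
      push_cast
      omega

-- ===== VERDICT (by name: the statement is the Claim_ definition above) =====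
theorem leb_len_spec : Claim_equal_leb_len := by
  intro n _ hpre
  unfold Spec_leb_len leb_len leb_len_alt
  by_cases h0 : n = 0
  · simp [h0]
  · have hn : 0 < n := by
      unfold Pre_leb_len at hpre; omega
    simp only [h0, if_false]
    rw [lebLoop_eq n.toNat n 0 hn (le_refl _)]
    rw [PySem.Int.floordiv_eq_ediv_of_pos (by norm_num : (0:Int) < 7)]
    push_cast
    omega
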